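-- pv_equiv track=rewrite | github.com/cojulieanne/COVID-Clincal-Trials | helpers.py | explode_dict
-- ===== SOURCE A (Python) =====
-- def explode_dict(x):
--     output = {}
--     x = str(x)
--     x = x.split('|')
--     for y in x:
--         if ':' in y:
--             values = [x.strip() for x in y.split(':')]
--             if values[0] in output.keys():
--                 output[values[0]] += [values[1]]
--             else:
--                 output[values[0]] = [values[1]]
--     if output:
--         return output
--     return None
-- ===== SOURCE B (Python) =====
-- def explode_dict(x):
--     pairs = []
--     for y in str(x).split('|'):
--         if ':' in y:
--             fields = [f.strip() for f in y.split(':')]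
--             pairs.append((fields[0], fields[1]))
--     keys = []
--     for k, _ in pairs:
--         if k not in keys:
--             keys.append(k)
--     if not keys:
--         return None
--     return {k: [v for kk, v in pairs if kk == k] for k in keys}
-- ===== Notes on version B (the rewrite author's own statement) =====
-- stated objective: alternative
-- what changed: Replaces A's single-pass incremental dict grouping (membership test then append-or-create per segment) by a two-phase pipeline: first extract the flat list of (key, value) pairs, then build the result by collecting, for each first-seen distinct key, all its values from the pair list.
import Mathlib
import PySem

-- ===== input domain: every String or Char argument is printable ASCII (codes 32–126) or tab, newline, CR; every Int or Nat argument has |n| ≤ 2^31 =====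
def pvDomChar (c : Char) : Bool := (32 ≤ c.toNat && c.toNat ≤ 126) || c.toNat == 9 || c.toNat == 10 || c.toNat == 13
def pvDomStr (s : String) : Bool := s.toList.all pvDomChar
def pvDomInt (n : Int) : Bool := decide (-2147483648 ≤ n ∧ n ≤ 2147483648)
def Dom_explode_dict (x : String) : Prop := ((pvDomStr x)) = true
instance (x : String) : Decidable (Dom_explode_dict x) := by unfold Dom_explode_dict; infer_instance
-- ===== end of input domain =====

-- B replaces A's incremental dict-membership/append grouping by a two-phase pipeline
-- (extract all (key, value) pairs first, then group per first-seen key); objective: alternative.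

-- ===== PORT A =====
-- s.split(sep) for a NONEMPTY literal sep: PySem.Str.split? is none only for sep = "", so getD is exact here
def pvSplit (s sep : String) : List String := (PySem.Str.split? s sep).getD []
-- shared field extraction: '[x.strip() for x in y.split(":")]' indexed at 0 and 1
-- (values[0]/values[1] always exist when ':' in y, so the pyGetD default is never used)
def pvKV (y : String) : String × String :=
  let values := (pvSplit y ":").map PySem.Str.strip
  (PySem.List.pyGetD values 0 "", PySem.List.pyGetD values 1 "")

def explode_dict (x : String) : Option (List (String × List String)) :=
  let segs := pvSplit x "|"
  let output := segs.foldl (fun (d : PySem.Dict String (List String)) y =>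
    if PySem.Str.isIn ":" y then
      let q := pvKV y
      if d.contains q.1 then d.insert q.1 (d.getD q.1 [] ++ [q.2])
      else d.insert q.1 [q.2]
    else d) PySem.Dict.empty
  if output.size ≠ 0 then some output.items else none

-- ===== PORT B =====
def explode_dict_alt (x : String) : Option (List (String × List String)) :=
  let pairs := (pvSplit x "|").foldl
    (fun (acc : List (String × String)) y =>
      if PySem.Str.isIn ":" y then acc ++ [pvKV y] else acc) []
  let keys := PySem.List.dedup (pairs.map Prod.fst)
  if keys = [] then none
  else some (keys.map (fun k => (k, (pairs.filter (fun p => p.1 == k)).map (·.2))))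

-- ===== PRECONDITION & SPEC =====
def Spec_explode_dict (x : String) (out : Option (List (String × List String))) : Prop := out = explode_dict_alt x
instance (x : String) (out : Option (List (String × List String))) : Decidable (Spec_explode_dict x out) := by unfold Spec_explode_dict; infer_instance

-- ===== CLAIM (what is proved, stated in full; the proofs are below) =====
def Claim_equal_explode_dict : Prop := ∀ (x : String), Dom_explode_dict x → Spec_explode_dict x (explode_dict x)

-- ===== LEMMAS AND PROOFS =====

-- A's explicit membership branch is exactly Python's d[k] = d.get(k, []) + [v], i.e. Dict.modify
theorem pv_step_eq (d : PySem.Dict String (List String)) (k v : String) :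
    (if d.contains k then d.insert k (d.getD k [] ++ [v]) else d.insert k [v])
      = d.modify k [] (· ++ [v]) := by
  by_cases h : d.contains k = true
  · simp only [h, if_true]; rfl
  · simp only [Bool.not_eq_true] at h
    simp only [h, Bool.false_eq_true, if_false]
    show d.insert k [v] = d.insert k (d.getD k [] ++ [v])
    rw [PySem.Dict.getD_of_not_contains d [] h, List.nil_append]

-- ===== VERDICT (by name: the statement is the Claim_ definition above) =====
theorem explode_dict_spec : Claim_equal_explode_dict := by
  intro x _
  unfold Spec_explode_dict explode_dict explode_dict_alt
  dsimp only
  set segs := pvSplit x "|" with hsegs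
  have hpairs : segs.foldl
      (fun (acc : List (String × String)) y =>
        if PySem.Str.isIn ":" y then acc ++ [pvKV y] else acc) []
      = (segs.filter (fun y => PySem.Str.isIn ":" y)).map pvKV := by
    simpa using PySem.List.foldl_append_if (fun y => PySem.Str.isIn ":" y) pvKV segs []
  rw [hpairs]
  set P := (segs.filter (fun y => PySem.Str.isIn ":" y)).map pvKV with hP
  -- A's dict loop is the modify-fold over P
  have hA : segs.foldl (fun (d : PySem.Dict String (List String)) y =>
      if PySem.Str.isIn ":" y then
        if d.contains (pvKV y).1 then d.insert (pvKV y).1 (d.getD (pvKV y).1 [] ++ [(pvKV y).2])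
        else d.insert (pvKV y).1 [(pvKV y).2]
      else d) PySem.Dict.empty
      = P.foldl (fun d p => d.modify p.1 [] (· ++ [p.2])) PySem.Dict.empty := by
    rw [hP, List.foldl_map, List.foldl_filter]
    refine PySem.List.foldl_congr_mem segs _ _ _ (fun d y _ => ?_)
    by_cases hy : PySem.Str.isIn ":" y = true
    · simp only [hy, if_true]
      exact pv_step_eq d (pvKV y).1 (pvKV y).2
    · rw [if_neg hy, if_neg hy]
  rw [hA]
  set D := P.foldl (fun d p => d.modify p.1 [] (· ++ [p.2])) PySem.Dict.empty with hD
  have hnodup : D.keys.Nodup := by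
    rw [hD]
    exact PySem.Dict.nodup_keys_foldl_modify_key P Prod.fst [] (fun _ p => (· ++ [p.2]))
      PySem.Dict.empty (by simp [PySem.Dict.keys_empty])
  have hkeys : D.keys = PySem.List.dedup (P.map Prod.fst) := by
    rw [hD, PySem.Dict.keys_foldl_modify_key P Prod.fst [] (fun _ p => (· ++ [p.2]))
      PySem.Dict.empty]
    simp [PySem.Dict.keys_empty, PySem.Set.update, PySem.Set.ofList_eq_foldl]
  have hitems : D.items = D.keys.map (fun k => (k, D.getD k [])) :=
    PySem.Dict.items_eq_map_keys D hnodup []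
  have hgetD : ∀ k, D.getD k [] = (P.filter (fun p => p.1 == k)).map (·.2) := by
    intro k
    rw [hD, PySem.Dict.getD_foldl_modify_append P PySem.Dict.empty k]
    simp [PySem.Dict.getD_empty]
  have hsize : D.size = D.keys.length := by
    simp [PySem.Dict.size, PySem.Dict.keys]
  by_cases hk : PySem.List.dedup (P.map Prod.fst) = []
  · have hke : D.keys = [] := by rw [hkeys, hk]
    rw [if_pos hk, if_neg]
    simp [hsize, hke]
  · have hne : D.keys ≠ [] := by rw [hkeys]; exact hk
    have hsz : D.size ≠ 0 := by
      rw [hsize]; simpa [List.length_eq_zero_iff] using hne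
    rw [if_pos hsz, if_neg hk, hitems, hkeys]
    exact congrArg some (List.map_congr_left (fun k _ => by rw [hgetD]))
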